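-- pv_equiv track=rewrite | github.com/dlfmadldlfmaek/fashioncloset-server | services/outfit_set_builder.py | _count_hits
-- ===== SOURCE A (Python) =====
-- from typing import Any, Dict, List, Optional, Set, Tuple
--
-- def _norm(x: Optional[str]) -> str:
--     return (x or "").strip().lower()
--
-- def _count_hits(tags: List[str], targets: Set[str]) -> int:
--     tags_n = [_norm(t) for t in (tags or []) if isinstance(t, str) and t.strip()]
--     if not tags_n or not targets:
--         return 0
--     targets_n = {_norm(t) for t in targets}
--     hits = 0
--     for t in tags_n:
--         for key in targets_n:
--             if key in t:
--                 hits += 1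
--                 break
--     return hits
-- ===== SOURCE B (Python) =====
-- def _norm(x):
--     return (x or "").strip().lower()
--
-- def _count_hits(tags, targets):
--     # Loop order swapped: one pass per target over the still-unhit tags,
--     # removing hit tags as we go (so duplicate/normalized-equal targets cost nothing
--     # and we stop early once every tag is hit).
--     tags_n = [_norm(t) for t in (tags or []) if isinstance(t, str) and t.strip()]
--     if not tags_n or not targets:
--         return 0
--     hits = 0
--     remaining = tags_n
--     for target in targets:
--         key = _norm(target)
--         still = []
--         for t in remaining:
--             if key in t:
--                 hits += 1
--             else:
--                 still.append(t)
--         remaining = still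
--         if not remaining:
--             break
--     return hits
-- ===== Notes on version B (the rewrite author's own statement) =====
-- stated objective: alternative
-- what changed: Loops are swapped: instead of scanning all normalized targets for every tag, B makes one pass per target over the set of still-unhit tags, removing hit tags (no normalized-target set is built, duplicate targets are free, and it stops early once all tags are hit).
import Mathlib
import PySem

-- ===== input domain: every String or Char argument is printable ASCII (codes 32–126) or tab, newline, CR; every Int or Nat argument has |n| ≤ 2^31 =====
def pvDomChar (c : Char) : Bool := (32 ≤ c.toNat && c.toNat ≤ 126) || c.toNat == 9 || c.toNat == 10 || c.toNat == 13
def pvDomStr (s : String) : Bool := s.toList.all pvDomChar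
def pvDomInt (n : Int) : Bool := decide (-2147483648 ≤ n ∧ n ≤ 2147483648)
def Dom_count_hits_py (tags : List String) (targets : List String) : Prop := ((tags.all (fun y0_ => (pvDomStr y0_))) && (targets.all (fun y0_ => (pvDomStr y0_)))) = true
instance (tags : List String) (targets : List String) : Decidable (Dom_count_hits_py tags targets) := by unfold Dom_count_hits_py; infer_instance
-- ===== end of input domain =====

-- B swaps the loops: one pass per target over the still-unhit tags, removing hits (alternative traversal, same result).


-- ===== PORT A =====
-- _norm(x) = (x or "").strip().lower()
def pvNorm (x : String) : String := PySem.Str.lower (PySem.Str.strip x)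

-- inner loop of A: 'for key in targets_n: if key in t: hits += 1; break'
def pvInnerA (t : String) (keys : List String) (hits : Int) : Int :=
  match keys with
  | [] => hits
  | k :: rest => if PySem.Str.isIn k t then hits + 1 else pvInnerA t rest hits

def count_hits_py (tags : List String) (targets : List String) : Int :=
  let tags_n := (tags.filter (fun t => PySem.Str.strip t != "")).map pvNorm
  if tags_n.isEmpty || targets.isEmpty then 0
  else
    let targets_n := PySem.Set.ofList (targets.map pvNorm)
    tags_n.foldl (fun hits t => pvInnerA t targets_n hits) 0

-- ===== PORT B =====
-- inner loop of B: one pass over 'remaining', counting hits of 'key' and keeping the rest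
def pvScanB (key : String) : List String → Int × List String
  | [] => (0, [])
  | t :: rest =>
      let (h, s) := pvScanB key rest
      if PySem.Str.isIn key t then (h + 1, s) else (h, t :: s)

-- outer loop of B over targets, with early break once 'remaining' is empty
def pvOuterB : List String → List String → Int → Int
  | [], _, hits => hits
  | tgt :: rest, remaining, hits =>
      let key := pvNorm tgt
      let (h, still) := pvScanB key remaining
      if still.isEmpty then hits + h else pvOuterB rest still (hits + h)

def count_hits_py_alt (tags : List String) (targets : List String) : Int :=
  let tags_n := (tags.filter (fun t => PySem.Str.strip t != "")).map pvNorm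
  if tags_n.isEmpty || targets.isEmpty then 0
  else pvOuterB targets tags_n 0

-- ===== PRECONDITION & SPEC =====
def Spec_count_hits_py (tags : List String) (targets : List String) (out : Int) : Prop := out = count_hits_py_alt tags targets
instance (tags : List String) (targets : List String) (out : Int) : Decidable (Spec_count_hits_py tags targets out) := by unfold Spec_count_hits_py; infer_instance

-- ===== CLAIM (what is proved, stated in full; the proofs are below) =====
def Claim_equal_count_hits_py : Prop := ∀ (tags : List String) (targets : List String), Dom_count_hits_py tags targets → Spec_count_hits_py tags targets (count_hits_py tags targets)

-- ===== LEMMAS AND PROOFS =====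

-- A's inner loop counts 1 iff some key is a substring of t
theorem pvInnerA_eq (t : String) (keys : List String) (hits : Int) :
    pvInnerA t keys hits = if keys.any (fun k => PySem.Str.isIn k t) then hits + 1 else hits := by
  induction keys with
  | nil => simp [pvInnerA]
  | cons k rest ih =>
    simp only [pvInnerA, List.any_cons, PySem.Str.isIn_eq] at *
    by_cases h : PySem.Chars.isIn k.toList t.toList = true <;> simp [h, ih]

-- any over the deduplicated set equals any over the original list
theorem any_ofList (xs : List String) (p : String → Bool) :
    (PySem.Set.ofList xs).any p = xs.any p := by
  refine Bool.eq_iff_iff.2 ?_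
  simp only [List.any_eq_true]
  constructor
  · rintro ⟨x, hx, hp⟩; exact ⟨x, (PySem.Set.mem_ofList xs x).1 hx, hp⟩
  · rintro ⟨x, hx, hp⟩; exact ⟨x, (PySem.Set.mem_ofList xs x).2 hx, hp⟩

-- A's value as a countP
theorem countA (tags_n keys : List String) :
    tags_n.foldl (fun hits t => pvInnerA t keys hits) 0
      = (tags_n.countP (fun t => keys.any (fun k => PySem.Str.isIn k t)) : Int) := by
  have h : ∀ (a : Int), tags_n.foldl (fun hits t => pvInnerA t keys hits) a
      = a + (tags_n.countP (fun t => keys.any (fun k => PySem.Str.isIn k t)) : Int) := by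
    intro a
    rw [show (fun (hits : Int) t => pvInnerA t keys hits)
        = (fun (hits : Int) t => if (fun t => keys.any (fun k => PySem.Str.isIn k t)) t then hits + 1 else hits) from ?_]
    · exact PySem.List.foldl_if_add_one _ _ _
    · funext hits t; exact pvInnerA_eq t keys hits
  simpa using h 0

-- B's scan splits: count of hits and the untouched remainder
theorem pvScanB_eq (key : String) (rem : List String) :
    pvScanB key rem = ((rem.countP (fun t => PySem.Str.isIn key t) : Int),
                       rem.filter (fun t => !PySem.Str.isIn key t)) := by
  induction rem with
  | nil => simp [pvScanB]
  | cons t rest ih =>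
    simp only [pvScanB, ih, List.countP_cons, List.filter_cons, PySem.Str.isIn_eq]
    cases h : PySem.Chars.isIn key.toList t.toList <;> simp [h] <;> push_cast <;> ring

-- countP over a disjunction splits into the first test plus countP on the leftovers
theorem countP_or_split (rem : List String) (p q : String → Bool) :
    rem.countP (fun t => p t || q t)
      = rem.countP p + (rem.filter (fun t => !p t)).countP q := by
  induction rem with
  | nil => simp
  | cons t rest ih =>
    by_cases h : p t = true <;>
      simp [List.countP_cons, List.filter_cons, h, ih] <;> omega

-- B's outer loop computes countP of "some target's normalization occurs in t"
theorem pvOuterB_eq (tgts : List String) : ∀ (rem : List String) (hits : Int),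
    pvOuterB tgts rem hits
      = hits + (rem.countP (fun t => tgts.any (fun k => PySem.Str.isIn (pvNorm k) t)) : Int) := by
  induction tgts with
  | nil => intro rem hits; simp [pvOuterB]
  | cons tgt rest ih =>
    intro rem hits
    simp only [pvOuterB, pvScanB_eq]
    have hsplit := countP_or_split rem (fun t => PySem.Str.isIn (pvNorm tgt) t)
        (fun t => rest.any (fun k => PySem.Str.isIn (pvNorm k) t))
    by_cases hempty : (rem.filter (fun t => !PySem.Str.isIn (pvNorm tgt) t)).isEmpty = true
    · rw [List.isEmpty_iff] at hempty
      simp only [hempty, List.isEmpty_nil, if_true]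
      simp only [List.any_cons, hsplit, hempty, List.countP_nil]
      push_cast; ring
    · simp only [hempty, if_false, ih]
      simp only [List.any_cons, hsplit]
      push_cast; ring

-- ===== VERDICT (by name: the statement is the Claim_ definition above) =====
theorem count_hits_py_spec : Claim_equal_count_hits_py := by
  intro tags targets _
  unfold Spec_count_hits_py
  simp only [count_hits_py, count_hits_py_alt]
  split_ifs with hg
  · rfl
  · rw [countA, pvOuterB_eq, zero_add]
    have hpred : ∀ t, ((PySem.Set.ofList (targets.map pvNorm)).any (fun k => PySem.Str.isIn k t))
        = targets.any (fun k => PySem.Str.isIn (pvNorm k) t) := by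
      intro t; rw [any_ofList, List.any_map]; rfl
    simp only [hpred]
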